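-- pv_equiv track=rewrite | github.com/ghyman-oreilly/ai-text-editor | read_files.py | group_snippets
-- ===== SOURCE A (Python) =====
-- from typing import List, Optional, Union
--
-- def is_delimited_block_start(line: str) -> bool:
--     return line.strip() in ("----", "++++", "____", "****", "|===")
--
-- def group_snippets(lines: List[str]) -> List[str]:
--     """
--     Groups lines into block-aware snippets. Treats code blocks, lists, admonitions, etc. as atomic.
--     """
--     snippets: List[str] = []
--     buffer: List[str] = []
--     inside_block = False
--     block_delimiter = None
--
--     for i, line in enumerate(lines):
--         stripped = line.strip()
--
--         # Enter or exit a delimited block scope (e.g. ----, ++++, etc.)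
--         if is_delimited_block_start(stripped):
--             if not inside_block:
--                 inside_block = True
--                 block_delimiter = stripped
--             elif stripped == block_delimiter:
--                 inside_block = False
--                 block_delimiter = None
--
--         buffer.append(line)
--
--         # Flush buffer at a blank line ONLY if not inside a block
--         if stripped == "" and not inside_block:
--             if buffer:
--                 snippets.append("\n".join(buffer).strip())
--                 buffer = []
--
--     # Final flush
--     if buffer:
--         snippets.append("\n".join(buffer).strip())
--
--     return [s for s in snippets if s.strip()]
-- ===== SOURCE B (Python) =====
-- from typing import List
--
-- def is_delimited_block_start(line: str) -> bool:
--     return line.strip() in ("----", "++++", "____", "****", "|===")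
--
-- def group_snippets(lines: List[str]) -> List[str]:
--     """
--     Two-phase: first collect boundary indices (blank lines seen outside any
--     delimited block), then partition `lines` into slices ending at each boundary.
--     """
--     bounds = []
--     inside_block = False
--     block_delimiter = None
--     for i, line in enumerate(lines):
--         stripped = line.strip()
--         if is_delimited_block_start(stripped):
--             if not inside_block:
--                 inside_block = True
--                 block_delimiter = stripped
--             elif stripped == block_delimiter:
--                 inside_block = False
--                 block_delimiter = None
--         if stripped == "" and not inside_block:
--             bounds.append(i)
--     pieces = []
--     start = 0
--     for b in bounds:
--         pieces.append(lines[start:b + 1])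
--         start = b + 1
--     if start < len(lines):
--         pieces.append(lines[start:])
--     snippets = ["\n".join(p).strip() for p in pieces]
--     return [s for s in snippets if s]
-- ===== Notes on version B (the rewrite author's own statement) =====
-- stated objective: alternative
-- what changed: Replaces A's fused append-and-flush loop by a two-phase decomposition: a first pass collects only the boundary indices (blank lines seen outside a delimited block), a second phase partitions the lines into slices ending at each boundary, then joins/strips/filters.
import Mathlib
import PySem

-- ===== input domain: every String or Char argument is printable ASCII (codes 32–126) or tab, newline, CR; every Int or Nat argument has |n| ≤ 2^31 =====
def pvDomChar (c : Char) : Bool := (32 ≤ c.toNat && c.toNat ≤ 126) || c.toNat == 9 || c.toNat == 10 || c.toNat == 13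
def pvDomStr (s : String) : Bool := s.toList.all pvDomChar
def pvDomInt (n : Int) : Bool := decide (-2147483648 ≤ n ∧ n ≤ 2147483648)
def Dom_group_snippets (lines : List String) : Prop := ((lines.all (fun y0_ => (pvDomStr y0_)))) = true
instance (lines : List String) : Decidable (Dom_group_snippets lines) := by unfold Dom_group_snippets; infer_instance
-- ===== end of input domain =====

-- B replaces A's fused append-and-flush loop by a compute-boundary-indices pass followed by
-- slicing, joining and filtering; same asymptotic cost, different decomposition (objective: alternative).

-- ===== PORT A =====
def is_delimited_block_start (line : String) : Bool :=
  (["----", "++++", "____", "****", "|==="] : List String).contains (PySem.Str.strip line)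

-- one step of A's for-loop over (snippets, buffer, inside_block, block_delimiter)
def pvStepA (st : List String × List String × Bool × Option String) (line : String) :
    List String × List String × Bool × Option String :=
  let (snippets, buffer, inside_block, block_delimiter) := st
  let stripped := PySem.Str.strip line
  let (inside_block, block_delimiter) :=
    if is_delimited_block_start stripped then
      if !inside_block then (true, some stripped)
      else if (some stripped : Option String) == block_delimiter then (false, (none : Option String))
      else (inside_block, block_delimiter)
    else (inside_block, block_delimiter)
  let buffer := buffer ++ [line]
  if stripped == "" && !inside_block then
    if !buffer.isEmpty then
      (snippets ++ [PySem.Str.strip (PySem.Str.join "\n" buffer)], [], inside_block, block_delimiter)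
    else (snippets, buffer, inside_block, block_delimiter)
  else (snippets, buffer, inside_block, block_delimiter)

def group_snippets (lines : List String) : List String :=
  let st := lines.foldl pvStepA ([], [], false, none)
  let snippets := st.1
  let buffer := st.2.1
  let snippets :=
    if !buffer.isEmpty then snippets ++ [PySem.Str.strip (PySem.Str.join "\n" buffer)]
    else snippets
  snippets.filter (fun s => !(PySem.Str.strip s == ""))

-- ===== PORT B =====
-- pass 1 of Source B: collect boundary indices (blank lines seen outside any delimited block)
def pvBoundsLoop : List String → Nat → Bool → Option String → List Nat → List Nat
  | [], _, _, _, bounds => bounds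
  | line :: rest, i, inside_block, block_delimiter, bounds =>
    let stripped := PySem.Str.strip line
    let (inside_block, block_delimiter) :=
      if is_delimited_block_start stripped then
        if !inside_block then (true, some stripped)
        else if (some stripped : Option String) == block_delimiter then (false, (none : Option String))
        else (inside_block, block_delimiter)
      else (inside_block, block_delimiter)
    let bounds := if stripped == "" && !inside_block then bounds ++ [i] else bounds
    pvBoundsLoop rest (i + 1) inside_block block_delimiter bounds

-- pass 2 of Source B: cut `lines` into a slice per boundary; returns (pieces, start)
def pvSliceLoop (lines : List String) : List Nat → Nat → List (List String) → List (List String) × Nat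
  | [], start, pieces => (pieces, start)
  | b :: bs, start, pieces =>
    pvSliceLoop lines bs (b + 1) (pieces ++ [PySem.List.slice lines (some (start : Int)) (some ((b + 1 : Nat) : Int))])

def group_snippets_alt (lines : List String) : List String :=
  let bounds := pvBoundsLoop lines 0 false none []
  let (pieces, start) := pvSliceLoop lines bounds 0 []
  let pieces :=
    if start < lines.length then pieces ++ [PySem.List.slice lines (some (start : Int)) none]
    else pieces
  let snippets := pieces.map (fun p => PySem.Str.strip (PySem.Str.join "\n" p))
  snippets.filter (fun s => !(s == ""))

-- ===== PRECONDITION & SPEC =====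
def Spec_group_snippets (lines : List String) (out : List String) : Prop := out = group_snippets_alt lines
instance (lines : List String) (out : List String) : Decidable (Spec_group_snippets lines out) := by unfold Spec_group_snippets; infer_instance

-- ===== CLAIM (what is proved, stated in full; the proofs are below) =====
def Claim_equal_group_snippets : Prop := ∀ (lines : List String), Dom_group_snippets lines → Spec_group_snippets lines (group_snippets lines)

-- ===== LEMMAS AND PROOFS =====

-- the shared delimiter state machine, factored out for the proofs
def pvToggle (stripped : String) (inside : Bool) (delim : Option String) : Bool × Option String :=
  if is_delimited_block_start stripped then
    if !inside then (true, some stripped)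
    else if (some stripped : Option String) == delim then (false, (none : Option String))
    else (inside, delim)
  else (inside, delim)

-- "\n".join(p).strip()
def pvJS (p : List String) : String := PySem.Str.strip (PySem.Str.join "\n" p)

theorem pvJS_eq (p : List String) : PySem.Str.strip (PySem.Str.join "\n" p) = pvJS p := rfl

-- reference partition: the groups of consecutive lines, each ended by a boundary blank line,
-- plus a trailing remainder group if any
def pvGroups : List String → Bool → Option String → List (List String)
  | [], _, _ => []
  | l :: rest, inside, delim =>
    let s := PySem.Str.strip l
    let st := pvToggle s inside delim
    if s == "" && !st.1 then [l] :: pvGroups rest st.1 st.2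
    else
      match pvGroups rest st.1 st.2 with
      | [] => [[l]]
      | g :: gs => (l :: g) :: gs

-- attach a pending buffer in front of the first group
def pvAttach (buf : List String) : List (List String) → List (List String)
  | [] => if buf.isEmpty then [] else [buf]
  | g :: gs => (buf ++ g) :: gs

-- boundary indices of pvGroups, relative to the start of the list
def pvRB : List String → Bool → Option String → List Nat
  | [], _, _ => []
  | l :: rest, inside, delim =>
    let s := PySem.Str.strip l
    let st := pvToggle s inside delim
    if s == "" && !st.1 then 0 :: (pvRB rest st.1 st.2).map (· + 1)
    else (pvRB rest st.1 st.2).map (· + 1)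

theorem pvAttach_nil (gs : List (List String)) : pvAttach [] gs = gs := by
  cases gs <;> simp [pvAttach]

theorem pvAttach_consHead (buf : List String) (l : String) (gs : List (List String)) :
    pvAttach buf (match gs with | [] => [[l]] | g :: gs' => (l :: g) :: gs') =
      pvAttach (buf ++ [l]) gs := by
  cases gs <;> simp [pvAttach]

theorem pvStepA_eq (snips buf : List String) (inside : Bool) (delim : Option String) (l : String) :
    pvStepA (snips, buf, inside, delim) l =
      (let s := PySem.Str.strip l
       let st := pvToggle s inside delim
       if s == "" && !st.1 then (snips ++ [pvJS (buf ++ [l])], [], st.1, st.2)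
       else (snips, buf ++ [l], st.1, st.2)) := by
  simp only [pvStepA, pvToggle, pvJS]
  split_ifs <;> simp_all

-- A's loop with final flush computes the attached groups, joined and stripped
theorem pvA_loop (rest : List String) :
    ∀ (snips buf : List String) (inside : Bool) (delim : Option String),
      (if !(List.foldl pvStepA (snips, buf, inside, delim) rest).2.1.isEmpty then
        (List.foldl pvStepA (snips, buf, inside, delim) rest).1 ++
          [pvJS (List.foldl pvStepA (snips, buf, inside, delim) rest).2.1]
      else (List.foldl pvStepA (snips, buf, inside, delim) rest).1) =
        snips ++ (pvAttach buf (pvGroups rest inside delim)).map pvJS := by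
  induction rest with
  | nil =>
    intro snips buf inside delim
    cases buf <;> simp [pvGroups, pvAttach]
  | cons l rest ih =>
    intro snips buf inside delim
    simp only [List.foldl_cons, pvStepA_eq]
    by_cases hc : (PySem.Str.strip l == "" && !(pvToggle (PySem.Str.strip l) inside delim).1) = true
    · simp only [if_pos hc]
      rw [ih, pvAttach_nil]
      simp only [pvGroups, if_pos hc, pvAttach, List.map_cons]
      simp
    · simp only [if_neg hc]
      rw [ih]
      simp only [pvGroups, if_neg hc]
      rw [← pvAttach_consHead]

theorem pvMap_add_add (xs : List Nat) (i : Nat) :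
    (xs.map (· + 1)).map (· + i) = xs.map (· + (i + 1)) := by
  rw [List.map_map]
  apply List.map_congr_left
  intro x _
  simp [Function.comp]
  omega

theorem pvBoundsLoop_cons (l : String) (rest : List String) (i : Nat) (inside : Bool)
    (delim : Option String) (bounds : List Nat) :
    pvBoundsLoop (l :: rest) i inside delim bounds =
      pvBoundsLoop rest (i + 1) (pvToggle (PySem.Str.strip l) inside delim).1
        (pvToggle (PySem.Str.strip l) inside delim).2
        (if PySem.Str.strip l == "" && !(pvToggle (PySem.Str.strip l) inside delim).1 then
          bounds ++ [i] else bounds) := by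
  simp only [pvBoundsLoop, pvToggle]
  split_ifs <;> simp_all

theorem pvBounds_eq (rest : List String) :
    ∀ (i : Nat) (inside : Bool) (delim : Option String) (acc : List Nat),
      pvBoundsLoop rest i inside delim acc = acc ++ (pvRB rest inside delim).map (· + i) := by
  induction rest with
  | nil => intro i inside delim acc; simp [pvBoundsLoop, pvRB]
  | cons l rest ih =>
    intro i inside delim acc
    rw [pvBoundsLoop_cons]
    simp only [pvRB]
    by_cases hc : (PySem.Str.strip l == "" && !(pvToggle (PySem.Str.strip l) inside delim).1) = true
    · simp only [if_pos hc]
      rw [ih]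
      simp [List.append_assoc]
      intro a _
      omega
    · simp only [if_neg hc]
      rw [ih, pvMap_add_add]

-- slice lines[s:k+1] extends lines[s:k] by the line at index k
theorem pvSlice_snoc (full : List String) (s k : Nat) (l : String) (rest : List String)
    (hs : s ≤ k) (hd : full.drop k = l :: rest) :
    PySem.List.slice full (some (s : Int)) (some ((k + 1 : Nat) : Int)) =
      PySem.List.slice full (some (s : Int)) (some ((k : Nat) : Int)) ++ [l] := by
  rw [PySem.List.slice_natCast, PySem.List.slice_natCast]
  have h1 : k + 1 - s = (k - s) + 1 := by omega
  rw [h1, List.take_add]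
  congr 1
  have h2 : (full.drop s).drop (k - s) = l :: rest := by
    rw [List.drop_drop]
    have h3 : s + (k - s) = k := by omega
    rw [h3, hd]
  rw [h2]
  simp

-- B's slicing of the (shifted) boundary list recovers the groups, with lines[s:k] pending
theorem pvB_loop (full : List String) (rest : List String) :
    ∀ (inside : Bool) (delim : Option String) (s k : Nat) (pieces : List (List String)),
      s ≤ k → k ≤ full.length → full.drop k = rest →
      (if (pvSliceLoop full ((pvRB rest inside delim).map (· + k)) s pieces).2 < full.length then
        (pvSliceLoop full ((pvRB rest inside delim).map (· + k)) s pieces).1 ++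
          [PySem.List.slice full
            (some ((pvSliceLoop full ((pvRB rest inside delim).map (· + k)) s pieces).2 : Int)) none]
      else (pvSliceLoop full ((pvRB rest inside delim).map (· + k)) s pieces).1) =
        pieces ++ pvAttach (PySem.List.slice full (some (s : Int)) (some ((k : Nat) : Int)))
          (pvGroups rest inside delim) := by
  induction rest with
  | nil =>
    intro inside delim s k pieces hs hk hd
    have hkl : k = full.length := by
      have := List.drop_eq_nil_iff.mp hd
      omega
    simp only [pvRB, List.map_nil, pvSliceLoop, pvGroups]
    subst hkl
    by_cases hlt : s < full.length
    · rw [if_pos hlt, PySem.List.slice_natCast, PySem.List.slice_from_natCast]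
      have htk : (full.drop s).take (full.length - s) = full.drop s :=
        List.take_of_length_le (by simp)
      rw [htk]
      simp only [pvAttach]
      rw [if_neg (by simp only [List.isEmpty_iff, List.drop_eq_nil_iff]; omega)]
    · rw [if_neg hlt, PySem.List.slice_natCast]
      have hdr : full.drop s = [] := List.drop_eq_nil_iff.mpr (by omega)
      simp [pvAttach, hdr]
  | cons l rest ih =>
    intro inside delim s k pieces hs hk hd
    have hklt : k < full.length := by
      by_contra h
      rw [List.drop_eq_nil_iff.mpr (by omega)] at hd
      simp at hd
    have hd' : full.drop (k + 1) = rest := by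
      have h := congrArg (List.drop 1) hd
      simp [List.drop_drop] at h
      exact h
    simp only [pvRB]
    by_cases hc : (PySem.Str.strip l == "" && !(pvToggle (PySem.Str.strip l) inside delim).1) = true
    · simp only [if_pos hc, List.map_cons, pvMap_add_add, Nat.zero_add, pvSliceLoop]
      rw [ih _ _ (k + 1) (k + 1) _ (by omega) (by omega) hd']
      have hsl : PySem.List.slice full (some ((k + 1 : Nat) : Int)) (some ((k + 1 : Nat) : Int)) = [] := by
        rw [PySem.List.slice_natCast]; simp
      rw [hsl, pvAttach_nil]
      simp only [pvGroups, if_pos hc, pvAttach]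
      rw [pvSlice_snoc full s k l rest hs hd]
      simp [List.append_assoc]
    · simp only [if_neg hc, pvMap_add_add]
      rw [ih _ _ s (k + 1) _ (by omega) (by omega) hd']
      rw [pvSlice_snoc full s k l rest hs hd]
      simp only [pvGroups, if_neg hc]
      rw [← pvAttach_consHead]

-- Python's strip is idempotent (needed because A filters on s.strip() and B on the
-- already-stripped snippet itself)
theorem pvStrip_fixed_head (p : Char → Bool) (xs : List Char) (hx : xs.dropWhile p = xs) :
    ((xs.reverse.dropWhile p).reverse).dropWhile p = (xs.reverse.dropWhile p).reverse := by
  have hsuf : xs.reverse.dropWhile p <:+ xs.reverse := List.dropWhile_suffix p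
  have hpre : (xs.reverse.dropWhile p).reverse <+: xs := by
    have := hsuf.reverse
    simpa using this
  rcases hc : (xs.reverse.dropWhile p).reverse with _ | ⟨c, cs⟩
  · simp
  · -- head c of this prefix of xs is xs's head, and it fails p since dropWhile p xs = xs
    obtain ⟨t, ht⟩ := hpre
    rw [hc] at ht
    have hxc : xs = c :: (cs ++ t) := by rw [← ht]; simp
    have hpc : p c = false := by
      by_contra h
      simp only [Bool.not_eq_false] at h
      rw [hxc, List.dropWhile_cons, h, if_pos rfl] at hx
      have hlen := congrArg List.length hx
      have h2 := List.length_dropWhile_le p (cs ++ t)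
      simp only [List.length_cons] at hlen
      omega
    rw [List.dropWhile_cons, hpc]
    simp

theorem pvChars_strip_strip (s : List Char) :
    PySem.Chars.strip (PySem.Chars.strip s) = PySem.Chars.strip s := by
  simp only [PySem.Chars.strip, PySem.Chars.lstrip, PySem.Chars.rstrip]
  have h1 := pvStrip_fixed_head PySem.Chars.isspace (s.dropWhile PySem.Chars.isspace)
    (List.dropWhile_idempotent _ _)
  rw [h1]
  simp [List.dropWhile_idempotent]

theorem pvStr_strip_strip (s : String) :
    PySem.Str.strip (PySem.Str.strip s) = PySem.Str.strip s := by
  apply String.toList_inj.mp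
  simp only [PySem.Str.toList_strip]
  exact pvChars_strip_strip _

theorem pvFilter_eq (gs : List (List String)) :
    (gs.map pvJS).filter (fun s => !(PySem.Str.strip s == "")) =
      (gs.map pvJS).filter (fun s => !(s == "")) := by
  apply List.filter_congr
  intro x hx
  obtain ⟨p, _, rfl⟩ := List.mem_map.mp hx
  simp only [pvJS, pvStr_strip_strip]

-- ===== VERDICT (by name: the statement is the Claim_ definition above) =====
theorem group_snippets_spec : Claim_equal_group_snippets := by
  intro lines _
  unfold Spec_group_snippets group_snippets group_snippets_alt
  simp only [pvJS_eq]
  rw [pvBounds_eq]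
  simp only [List.nil_append]
  rw [pvA_loop lines [] [] false none,
    pvB_loop lines lines false none 0 0 [] (Nat.le_refl 0) (Nat.zero_le _) (by simp)]
  have hsl : PySem.List.slice lines (some ((0 : Nat) : Int)) (some ((0 : Nat) : Int)) = [] := by
    rw [PySem.List.slice_natCast]; simp
  rw [hsl, pvAttach_nil]
  simp only [List.nil_append]
  exact pvFilter_eq _
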